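-- pv_equiv track=rewrite | github.com/syaofox/GPT-SoVITS | GPT_SoVITS/text/cleaner.py | parse_special_string
-- ===== SOURCE A (Python) =====
-- def parse_special_string(s):
--         result = []
--         i = 0
--         while i < len(s):
--             if s[i] == '{':
--                 # 找到花括号的闭合部分
--                 j = i
--                 while j < len(s) and s[j] != '}':
--                     j += 1
--                 if j < len(s):
--                     result[-1] += s[i:j+1]  # 将花括号部分合并到前一个字符上
--                     i = j + 1
--                 else:
--                     # 如果没有闭合花括号，按普通字符处理
--                     result.append(s[i])
--                     i += 1
--             else:
--                 result.append(s[i])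
--                 i += 1
--         return result
-- ===== SOURCE B (Python) =====
-- def parse_special_string(s):
--     # Pass 1: tokenize into '{...}' blocks (when a closing brace exists) or single characters.
--     tokens = []
--     i = 0
--     n = len(s)
--     while i < n:
--         if s[i] == '{':
--             j = s.find('}', i)
--             if j != -1:
--                 tokens.append(s[i:j + 1])
--                 i = j + 1
--                 continue
--         tokens.append(s[i])
--         i += 1
--     # Pass 2: fold tokens into the result, merging complete brace blocks into the previous entry.
--     result = []
--     for tok in tokens:
--         if tok.startswith('{') and tok.endswith('}'):
--             result[-1] += tok
--         else:
--             result.append(tok)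
--     return result
-- ===== Notes on version B (the rewrite author's own statement) =====
-- stated objective: idiomatic
-- what changed: Replaces A's single interleaved index-scanning loop (with a nested j-scan and in-place merge) by a two-pass tokenize-then-fold structure: first split the string into '{...}' block tokens or single-character tokens using str.find, then fold the token list, merging complete brace blocks into the previous entry.
import Mathlib
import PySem

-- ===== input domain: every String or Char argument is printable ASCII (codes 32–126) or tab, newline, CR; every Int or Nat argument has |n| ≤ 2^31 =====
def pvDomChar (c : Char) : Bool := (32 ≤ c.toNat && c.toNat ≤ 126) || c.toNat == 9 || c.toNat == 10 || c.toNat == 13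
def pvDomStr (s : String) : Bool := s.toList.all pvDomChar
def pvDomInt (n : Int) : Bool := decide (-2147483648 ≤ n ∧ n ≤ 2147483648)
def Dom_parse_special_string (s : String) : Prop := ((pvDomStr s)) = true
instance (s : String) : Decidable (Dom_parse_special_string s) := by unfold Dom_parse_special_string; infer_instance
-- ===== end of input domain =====

-- B restructures A as tokenize-then-fold (idiomatic two-pass decomposition); same O(n) cost.

-- ===== PORT A =====
-- shared helper: Python's `result[-1] += blk` on the reversed accumulator
-- (on an empty accumulator Python raises IndexError; that input is outside Pre_ below)
def pvMergeHead (acc : List (List Char)) (blk : List Char) : List (List Char) :=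
  match acc with
  | [] => []
  | h :: t => (h ++ blk) :: t

-- A's inner `while j < len(s) and s[j] != '}'` scan: chars up to and including the
-- first '}' plus the remainder, or none if no '}' exists
def pvFindCloseA : List Char → Option (List Char × List Char)
  | [] => none
  | c :: cs =>
    if c = '}' then some ([c], cs)
    else
      match pvFindCloseA cs with
      | some (blk, rest) => some (c :: blk, rest)
      | none => none

theorem pvFindCloseA_rest_lt : ∀ (cs blk rest : List Char),
    pvFindCloseA cs = some (blk, rest) → rest.length < cs.length := by
  intro cs
  induction cs with
  | nil => intro blk rest h; simp [pvFindCloseA] at h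
  | cons c cs ih =>
    intro blk rest h
    by_cases hc : c = '}'
    · rw [pvFindCloseA, if_pos hc] at h
      simp only [Option.some.injEq, Prod.mk.injEq] at h
      rw [← h.2]
      simp
    · rw [pvFindCloseA, if_neg hc] at h
      cases hr : pvFindCloseA cs with
      | none => rw [hr] at h; exact absurd h (by simp)
      | some p =>
        obtain ⟨blk', rest'⟩ := p
        rw [hr] at h
        simp only [Option.some.injEq, Prod.mk.injEq] at h
        have := ih blk' rest' hr
        rw [← h.2]
        simp only [List.length_cons]
        omega

-- A's outer while loop; acc holds `result` reversed
def pvGoA : List Char → List (List Char) → List (List Char)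
  | [], acc => acc
  | c :: cs, acc =>
    if c = '{' then
      match h : pvFindCloseA (c :: cs) with
      | some (blk, rest) => pvGoA rest (pvMergeHead acc blk)
      | none => pvGoA cs ([c] :: acc)
    else pvGoA cs ([c] :: acc)
termination_by cs => cs.length
decreasing_by
  · exact Nat.lt_of_lt_of_le (pvFindCloseA_rest_lt _ _ _ h) (by simp)
  · simp
  · simp

def parse_special_string (s : String) : List String :=
  ((pvGoA s.toList []).reverse).map (fun l => String.ofList l)

-- ===== PORT B =====
-- pass 1 of Source B: the token list — '{...}' blocks (via find('}', i)) or single chars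
def pvTokensB : List Char → List (List Char)
  | [] => []
  | c :: cs =>
    if c = '{' then
      match PySem.List.index? cs '}' with
      | some j => (c :: cs.take (j + 1)) :: pvTokensB (cs.drop (j + 1))
      | none => [c] :: pvTokensB cs
    else [c] :: pvTokensB cs
termination_by cs => cs.length
decreasing_by
  · simp
  · simp
  · simp

-- pass 2 of Source B: one fold step (acc holds `result` reversed)
def pvStepB (acc : List (List Char)) (tok : List Char) : List (List Char) :=
  if tok.head? = some '{' ∧ tok.getLast? = some '}' then pvMergeHead acc tok
  else tok :: acc

def parse_special_string_alt (s : String) : List String :=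
  (((pvTokensB s.toList).foldl pvStepB []).reverse).map (fun l => String.ofList l)

-- ===== PRECONDITION & SPEC =====
-- Pre_ excludes exactly the strings on which Python A raises IndexError (result[-1]
-- with result empty): those starting with '{' that contain a '}'.
def Pre_parse_special_string (s : String) : Prop :=
  ¬ (s.toList.head? = some '{' ∧ '}' ∈ s.toList)
instance (s : String) : Decidable (Pre_parse_special_string s) := by
  unfold Pre_parse_special_string; infer_instance

def pvWitness_parse_special_string : String := "a{x}b"

def Spec_parse_special_string (s : String) (out : List String) : Prop := out = parse_special_string_alt s
instance (s : String) (out : List String) : Decidable (Spec_parse_special_string s out) := by unfold Spec_parse_special_string; infer_instance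

-- ===== CLAIM (what is proved, stated in full; the proofs are below) =====
def Claim_equal_parse_special_string : Prop := ∀ (s : String), Dom_parse_special_string s → Pre_parse_special_string s → Spec_parse_special_string s (parse_special_string s)

-- ===== LEMMAS AND PROOFS =====

-- A's inner scan agrees with B's find-and-slice tokenisation of a block
theorem pvFindCloseA_eq_index? : ∀ (cs : List Char),
    pvFindCloseA cs = (PySem.List.index? cs '}').map (fun j => (cs.take (j + 1), cs.drop (j + 1))) := by
  intro cs
  induction cs with
  | nil => simp [pvFindCloseA, PySem.List.index?]
  | cons c cs ih =>
    by_cases hc : c = '}'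
    · subst hc
      rw [PySem.List.index?_cons_self '}' cs]
      simp [pvFindCloseA]
    · rw [PySem.List.index?_cons_of_ne cs hc]
      simp only [pvFindCloseA, if_neg hc, ih]
      cases PySem.List.index? cs '}' with
      | none => simp
      | some j => simp

theorem getLast?_take_of_getElem {cs : List Char} {j : Nat} (hj : j < cs.length)
    (h : cs[j] = '}') : (cs.take (j + 1)).getLast? = some '}' := by
  rw [List.getLast?_eq_getElem?]
  have hlen : (cs.take (j + 1)).length = j + 1 := by simp; omega
  rw [hlen]
  simp only [Nat.add_sub_cancel]
  rw [List.getElem?_take_of_lt (by omega)]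
  rw [List.getElem?_eq_getElem hj, h]

-- main loop invariant: A's interleaved scan equals B's fold over the token list
theorem pvGoA_eq_fold : ∀ (cs : List Char) (acc : List (List Char)),
    pvGoA cs acc = (pvTokensB cs).foldl pvStepB acc := by
  intro cs acc
  induction cs, acc using pvGoA.induct with
  | case1 acc => simp [pvGoA, pvTokensB]
  | case2 cs acc blk rest hfind ih =>
    have hidx := pvFindCloseA_eq_index? ('{' :: cs)
    rw [hfind, PySem.List.index?_cons_of_ne cs (by decide)] at hidx
    cases hj : PySem.List.index? cs '}' with
    | none => rw [hj] at hidx; simp at hidx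
    | some j =>
      rw [hj] at hidx
      simp only [Option.map_some, Option.some.injEq, Prod.mk.injEq,
        List.take_succ_cons, List.drop_succ_cons] at hidx
      obtain ⟨hblk, hrest⟩ := hidx
      obtain ⟨hjlt, hget, -⟩ := PySem.List.getElem_of_index?_eq_some hj
      rw [pvGoA, pvTokensB]
      simp only [reduceIte, hj, List.foldl_cons]
      split
      next blk' rest' h2 =>
        rw [hfind] at h2
        simp only [Option.some.injEq, Prod.mk.injEq] at h2
        obtain ⟨hb2, hr2⟩ := h2
        have hne : List.take (j + 1) cs ≠ [] :=
          List.ne_nil_of_length_pos (by simp [List.length_take]; omega)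
        have hcond : (('{' :: List.take (j + 1) cs) : List Char).head? = some '{' ∧
            ('{' :: List.take (j + 1) cs).getLast? = some '}' :=
          ⟨rfl, by obtain ⟨x, t', ht⟩ := List.exists_cons_of_ne_nil hne
                   rw [ht, List.getLast?_cons_cons, ← ht]
                   exact getLast?_take_of_getElem hjlt hget⟩
        rw [← hb2, ← hr2, ih, hrest, pvStepB, if_pos hcond, ← hblk]
      next h2 => rw [hfind] at h2; simp at h2
  | case3 cs acc hfind ih =>
    have hidx := pvFindCloseA_eq_index? ('{' :: cs)
    rw [hfind, PySem.List.index?_cons_of_ne cs (by decide)] at hidx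
    cases hj : PySem.List.index? cs '}' with
    | some j => rw [hj] at hidx; simp at hidx
    | none =>
      rw [pvGoA, pvTokensB]
      simp only [reduceIte, hj, List.foldl_cons]
      split
      next blk' rest' h2 => rw [hfind] at h2; simp at h2
      next h2 =>
        rw [ih]
        rfl
  | case4 c cs acc hc ih =>
    rw [pvGoA, if_neg hc, pvTokensB, if_neg hc]
    simp only [List.foldl_cons]
    rw [ih]
    congr 1
    rw [pvStepB, if_neg]
    rintro ⟨h1, -⟩
    simp at h1
    exact hc h1

-- ===== VERDICT (by name: the statement is the Claim_ definition above) =====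
theorem parse_special_string_spec : Claim_equal_parse_special_string := by
  intro s _ _
  unfold Spec_parse_special_string parse_special_string parse_special_string_alt
  rw [pvGoA_eq_fold]
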